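-- pv_equiv track=rewrite | github.com/avyukd/praxis-v2 | handlers/surface_ideas.py | _enforce_anomaly_cap
-- ===== SOURCE A (Python) =====
-- from typing import Any
--
-- def _enforce_anomaly_cap(ideas_raw: list[dict[str, Any]]) -> tuple[list[dict[str, Any]], int]:
--     """Keep at most 1 anomaly. Return (filtered, dropped_count)."""
--     out: list[dict[str, Any]] = []
--     anomaly_seen = False
--     dropped = 0
--     for i in ideas_raw:
--         if i.get("idea_type") == "anomaly":
--             if anomaly_seen:
--                 dropped += 1
--                 continue
--             anomaly_seen = True
--         out.append(i)
--     return out, dropped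
-- ===== SOURCE B (Python) =====
-- from typing import Any
--
-- def _enforce_anomaly_cap(ideas_raw: list[dict[str, Any]]) -> tuple[list[dict[str, Any]], int]:
--     """Keep at most 1 anomaly. Return (filtered, dropped_count)."""
--     # Pass 1: collect the indices of all anomaly ideas.
--     anomaly_indices = [j for j, idea in enumerate(ideas_raw)
--                        if idea.get("idea_type") == "anomaly"]
--     first = anomaly_indices[0] if anomaly_indices else None
--     # Pass 2: keep everything except anomalies after the first one.
--     out = [idea for j, idea in enumerate(ideas_raw)
--            if idea.get("idea_type") != "anomaly" or j == first]
--     dropped = len(anomaly_indices) - (1 if anomaly_indices else 0)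
--     return out, dropped
-- ===== Notes on version B (the rewrite author's own statement) =====
-- stated objective: alternative
-- what changed: A's single fused loop with anomaly_seen/dropped state is replaced by two stateless passes: first collect the indices of all anomaly ideas, then filter by index keeping only the first anomaly, with dropped computed arithmetically from the index list's length.
import Mathlib
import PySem

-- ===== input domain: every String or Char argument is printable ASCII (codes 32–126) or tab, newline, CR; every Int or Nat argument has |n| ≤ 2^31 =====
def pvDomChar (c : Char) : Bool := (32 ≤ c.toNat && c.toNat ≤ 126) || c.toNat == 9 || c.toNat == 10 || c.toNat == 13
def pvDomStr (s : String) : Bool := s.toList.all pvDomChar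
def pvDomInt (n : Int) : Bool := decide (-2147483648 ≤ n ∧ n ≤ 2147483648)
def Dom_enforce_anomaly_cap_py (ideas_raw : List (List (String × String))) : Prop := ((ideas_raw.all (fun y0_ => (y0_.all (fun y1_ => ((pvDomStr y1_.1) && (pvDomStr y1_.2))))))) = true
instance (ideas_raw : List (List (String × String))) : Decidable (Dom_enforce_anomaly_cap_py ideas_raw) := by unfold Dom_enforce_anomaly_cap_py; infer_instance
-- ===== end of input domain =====

-- B replaces A's fused stateful loop by two index-based passes (collect anomaly
-- indices, then filter by index); same cost, different decomposition (objective: alternative).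

-- i.get("idea_type") == "anomaly"
def pvIsAnom (i : List (String × String)) : Bool :=
  (PySem.Dict.ofList i).get? "idea_type" == some "anomaly"

-- ===== PORT A =====
-- the body of A's for-loop, named (state = (out, anomaly_seen, dropped))
def pvStepA : (List (List (String × String)) × Bool × Int) → List (String × String) → (List (List (String × String)) × Bool × Int) :=
  fun st i =>
    let (out, anomaly_seen, dropped) := st
    if pvIsAnom i then
      if anomaly_seen then (out, anomaly_seen, dropped + 1)
      else (out ++ [i], true, dropped)
    else (out ++ [i], anomaly_seen, dropped)

def enforce_anomaly_cap_py (ideas_raw : List (List (String × String))) : (List (List (String × String))) × Int :=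
  let st := ideas_raw.foldl pvStepA ([], false, 0)
  (st.1, st.2.2)

-- ===== PORT B =====
-- pass 1: [j for j, idea in enumerate(ideas_raw) if idea.get("idea_type") == "anomaly"]
def pvAnomIdx (ideas_raw : List (List (String × String))) (s : Int) : List Int :=
  ((PySem.List.enumerate ideas_raw s).filter (fun p => pvIsAnom p.2)).map (·.1)

-- pass 2: [idea for j, idea in enumerate(ideas_raw) if ... or j == first]
def pvOutB (ideas_raw : List (List (String × String))) (s : Int) (first : Option Int) : List (List (String × String)) :=
  ((PySem.List.enumerate ideas_raw s).filter
    (fun p => !(pvIsAnom p.2) || (some p.1 == first))).map (·.2)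

def enforce_anomaly_cap_py_alt (ideas_raw : List (List (String × String))) : (List (List (String × String))) × Int :=
  let anomaly_indices := pvAnomIdx ideas_raw 0
  let first : Option Int := anomaly_indices.head?
  let out := pvOutB ideas_raw 0 first
  let dropped : Int :=
    (anomaly_indices.length : Int) - (if anomaly_indices.isEmpty then 0 else 1)
  (out, dropped)

-- ===== PRECONDITION & SPEC =====
def Spec_enforce_anomaly_cap_py (ideas_raw : List (List (String × String))) (out : (List (List (String × String))) × Int) : Prop := out = enforce_anomaly_cap_py_alt ideas_raw
instance (ideas_raw : List (List (String × String))) (out : (List (List (String × String))) × Int) : Decidable (Spec_enforce_anomaly_cap_py ideas_raw out) := by unfold Spec_enforce_anomaly_cap_py; infer_instance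

-- ===== CLAIM (what is proved, stated in full; the proofs are below) =====
def Claim_equal_enforce_anomaly_cap_py : Prop := ∀ (ideas_raw : List (List (String × String))), Dom_enforce_anomaly_cap_py ideas_raw → Spec_enforce_anomaly_cap_py ideas_raw (enforce_anomaly_cap_py ideas_raw)

-- ===== LEMMAS AND PROOFS =====

def pvQ (i : List (String × String)) : Bool := !(pvIsAnom i)

-- the common closed characterization both ports are reduced to
def pvKeep (l : List (List (String × String))) : List (List (String × String)) :=
  l.takeWhile pvQ ++ (l.dropWhile pvQ).take 1 ++ ((l.dropWhile pvQ).drop 1).filter pvQ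

def pvDrop (l : List (List (String × String))) : Int :=
  (((l.dropWhile pvQ).drop 1).countP (fun i => pvIsAnom i) : Nat)

-- A's loop after the first anomaly has been seen
theorem foldA_true (l : List (List (String × String))) :
    ∀ (out : List (List (String × String))) (d : Int),
      l.foldl pvStepA (out, true, d)
        = (out ++ l.filter pvQ, true, d + (l.countP (fun i => pvIsAnom i) : Nat)) := by
  induction l with
  | nil => intro out d; simp [List.foldl]
  | cons i t ih =>
    intro out d
    by_cases h : pvIsAnom i = true
    · simp [List.foldl, pvStepA, h, pvQ, ih]
      push_cast; ring
    · simp [List.foldl, pvStepA, h, pvQ, ih, List.append_assoc]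

-- A's loop from the initial state
theorem foldA_false (l : List (List (String × String))) :
    ∀ (out : List (List (String × String))),
      l.foldl pvStepA (out, false, 0)
        = (out ++ pvKeep l, !(l.all pvQ), pvDrop l) := by
  induction l with
  | nil => intro out; simp [List.foldl, pvKeep, pvDrop]
  | cons i t ih =>
    intro out
    by_cases h : pvIsAnom i = true
    · simp [List.foldl, pvStepA, h, foldA_true, pvKeep, pvDrop, pvQ, List.all_cons]
    · simp [List.foldl, pvStepA, h, pvKeep, pvDrop, pvQ, List.all_cons, ih,
        List.append_assoc]

-- pass-1 list, structurally
theorem anomIdx_cons (i : List (String × String)) (t : List (List (String × String))) (s : Int) :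
    pvAnomIdx (i :: t) s
      = if pvIsAnom i then s :: pvAnomIdx t (s + 1) else pvAnomIdx t (s + 1) := by
  by_cases h : pvIsAnom i = true <;>
    simp [pvAnomIdx, PySem.List.enumerate_cons, List.filter_cons, h]

theorem anomIdx_length (l : List (List (String × String))) :
    ∀ s : Int, (pvAnomIdx l s).length = l.countP (fun i => pvIsAnom i) := by
  induction l with
  | nil => intro s; simp [pvAnomIdx, PySem.List.enumerate_nil]
  | cons i t ih =>
    intro s
    by_cases h : pvIsAnom i = true <;>
      simp [anomIdx_cons, h, ih, List.countP_cons]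

-- filtering an enumeration by a predicate on the value only, then projecting values
theorem enum_filter_snd (q : List (String × String) → Bool)
    (l : List (List (String × String))) :
    ∀ (s : Int),
      ((PySem.List.enumerate l s).filter (fun p => q p.2)).map (·.2) = l.filter q := by
  induction l with
  | nil => intro s; simp [PySem.List.enumerate_nil]
  | cons i t ih =>
    intro s
    by_cases h : q i = true <;>
      simp [PySem.List.enumerate_cons, List.filter_cons, h, ih]

-- when the first anomaly's index is s, the index test is vacuous on the tail
theorem outB_first (t : List (List (String × String))) (s : Int) :
    pvOutB t (s + 1) (some s) = t.filter pvQ := by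
  have hc : ∀ p ∈ PySem.List.enumerate t (s + 1),
      (!(pvIsAnom p.2) || (some p.1 == some s)) = pvQ p.2 := by
    intro p hp
    rcases (PySem.List.mem_enumerate_iff t (s + 1) p).1 hp with ⟨k, hk, rfl⟩
    have hne : ((some (s + 1 + (k : Int)) : Option Int) == some s) = false := by
      simp only [beq_eq_false_iff_ne, ne_eq, Option.some.injEq]
      omega
    simp [hne, pvQ]
  unfold pvOutB
  rw [List.filter_congr hc]
  exact enum_filter_snd pvQ t (s + 1)

-- B's second pass equals the closed characterization
theorem outB_keep (l : List (List (String × String))) :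
    ∀ s : Int, pvOutB l s (pvAnomIdx l s).head? = pvKeep l := by
  induction l with
  | nil => intro s; simp [pvOutB, pvKeep, PySem.List.enumerate_nil]
  | cons i t ih =>
    intro s
    by_cases h : pvIsAnom i = true
    · rw [anomIdx_cons, if_pos h]
      rw [List.head?_cons]
      unfold pvOutB
      rw [PySem.List.enumerate_cons]
      rw [List.filter_cons]
      have hf : ((PySem.List.enumerate t (s + 1)).filter
          (fun p => !(pvIsAnom p.2) || (some p.1 == some s))).map (·.2)
            = t.filter pvQ := outB_first t s
      simp only [h, Bool.not_true, Bool.false_or, beq_self_eq_true, if_true,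
        List.map_cons, hf]
      simp [pvKeep, pvQ, h]
    · rw [anomIdx_cons, if_neg h]
      have hstep : pvOutB (i :: t) s (pvAnomIdx t (s + 1)).head?
          = i :: pvOutB t (s + 1) (pvAnomIdx t (s + 1)).head? := by
        unfold pvOutB
        rw [PySem.List.enumerate_cons, List.filter_cons]
        simp [h]
      rw [hstep, ih (s + 1)]
      simp [pvKeep, pvQ, h]

-- B's dropped count equals the closed characterization
theorem dropB_eq (l : List (List (String × String))) :
    ∀ s : Int,
      ((pvAnomIdx l s).length : Int) - (if (pvAnomIdx l s).isEmpty then 0 else 1)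
        = pvDrop l := by
  induction l with
  | nil => intro s; simp [pvAnomIdx, PySem.List.enumerate_nil, pvDrop]
  | cons i t ih =>
    intro s
    by_cases h : pvIsAnom i = true
    · rw [anomIdx_cons, if_pos h]
      simp [anomIdx_length, pvDrop, pvQ, h]
    · rw [anomIdx_cons, if_neg h]
      rw [ih (s + 1)]
      simp [pvDrop, pvQ, h]

-- ===== VERDICT (by name: the statement is the Claim_ definition above) =====
theorem enforce_anomaly_cap_py_spec : Claim_equal_enforce_anomaly_cap_py := by
  intro l _
  show enforce_anomaly_cap_py l = enforce_anomaly_cap_py_alt l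
  simp only [enforce_anomaly_cap_py, enforce_anomaly_cap_py_alt, foldA_false l [],
    List.nil_append, outB_keep l 0, dropB_eq l 0]
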